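-- pv_equiv track=rewrite | github.com/starreeze/geocap | data/caption.py | decide_abs_pos
-- ===== SOURCE A (Python) =====
-- def decide_abs_pos(center_positions, x1, x2, y1, y2):
--     abs_positions = []
--     for center in center_positions:
--         x = center[0]
--         y = center[1]
--         if x < x1:
--             if y < y1:
--                 abs_positions.append("bottom_left")
--             elif y <= y2:
--                 abs_positions.append("left")
--             else:
--                 abs_positions.append("top_left")
--         elif x <= x2:
--             if y < y1:
--                 abs_positions.append("bottom")
--             elif y <= y2:
--                 abs_positions.append("center")
--             else:
--                 abs_positions.append("top")
--         else:
--             if y < y1: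
--                 abs_positions.append("bottom_right")
--             elif y <= y2:
--                 abs_positions.append("right")
--             else:
--                 abs_positions.append("top_right")
--     return abs_positions
-- ===== SOURCE B (Python) =====
-- def decide_abs_pos(center_positions, x1, x2, y1, y2):
--     out = []
--     for x, y in center_positions:
--         parts = []
--         if y < y1:
--             parts.append("bottom")
--         elif y > y2:
--             parts.append("top")
--         if x < x1:
--             parts.append("left")
--         elif x > x2:
--             parts.append("right")
--         out.append("_".join(parts) if parts else "center")
--     return out
-- ===== Notes on version B (the rewrite author's own statement) =====
-- stated objective: simpler
-- what changed: B never selects among the nine label literals: it builds each label compositionally by joining an independent vertical fragment (bottom/top/none) and horizontal fragment (left/right/none) with '_', defaulting to 'center' when both are absent.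
import Mathlib
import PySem

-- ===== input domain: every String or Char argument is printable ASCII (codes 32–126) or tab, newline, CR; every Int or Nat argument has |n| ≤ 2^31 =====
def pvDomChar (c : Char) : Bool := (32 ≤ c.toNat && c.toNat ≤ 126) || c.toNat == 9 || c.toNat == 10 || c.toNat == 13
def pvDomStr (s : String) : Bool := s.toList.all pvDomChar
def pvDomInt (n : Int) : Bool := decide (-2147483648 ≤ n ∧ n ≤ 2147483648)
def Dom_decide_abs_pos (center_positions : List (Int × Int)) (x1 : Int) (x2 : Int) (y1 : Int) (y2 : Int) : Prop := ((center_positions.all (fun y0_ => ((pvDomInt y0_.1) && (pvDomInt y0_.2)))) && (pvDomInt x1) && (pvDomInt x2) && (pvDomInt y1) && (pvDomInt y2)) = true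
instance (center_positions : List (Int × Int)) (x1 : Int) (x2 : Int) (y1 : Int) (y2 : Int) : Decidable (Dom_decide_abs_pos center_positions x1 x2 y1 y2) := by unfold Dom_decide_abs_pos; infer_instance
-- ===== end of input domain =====

-- ===== PORT A =====
-- Header: B builds each label compositionally ('_'-join of a vertical and a horizontal fragment,
-- 'center' when both are empty) instead of selecting among nine literals (objective: simpler).
def decide_abs_pos (center_positions : List (Int × Int)) (x1 : Int) (x2 : Int) (y1 : Int) (y2 : Int) : List String :=
  center_positions.foldl (fun abs_positions center =>
    let x := center.1
    let y := center.2
    if x < x1 then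
      if y < y1 then abs_positions ++ ["bottom_left"]
      else if y ≤ y2 then abs_positions ++ ["left"]
      else abs_positions ++ ["top_left"]
    else if x ≤ x2 then
      if y < y1 then abs_positions ++ ["bottom"]
      else if y ≤ y2 then abs_positions ++ ["center"]
      else abs_positions ++ ["top"]
    else
      if y < y1 then abs_positions ++ ["bottom_right"]
      else if y ≤ y2 then abs_positions ++ ["right"]
      else abs_positions ++ ["top_right"]) []

-- ===== PORT B =====
-- per-point: two independent fragment lists, '_'-joined; "center" when no fragment applies
def decide_abs_pos_alt (center_positions : List (Int × Int)) (x1 : Int) (x2 : Int) (y1 : Int) (y2 : Int) : List String :=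
  center_positions.foldl (fun out c =>
    let parts : List String :=
      (if c.2 < y1 then ["bottom"] else if y2 < c.2 then ["top"] else []) ++
      (if c.1 < x1 then ["left"] else if x2 < c.1 then ["right"] else [])
    out ++ [if parts = [] then "center" else String.intercalate "_" parts]) []

-- ===== PRECONDITION & SPEC =====
def Spec_decide_abs_pos (center_positions : List (Int × Int)) (x1 : Int) (x2 : Int) (y1 : Int) (y2 : Int) (out : List String) : Prop := out = decide_abs_pos_alt center_positions x1 x2 y1 y2
instance (center_positions : List (Int × Int)) (x1 : Int) (x2 : Int) (y1 : Int) (y2 : Int) (out : List String) : Decidable (Spec_decide_abs_pos center_positions x1 x2 y1 y2 out) := by unfold Spec_decide_abs_pos; infer_instance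

-- ===== CLAIM =====
def Claim_equal_decide_abs_pos : Prop := ∀ (center_positions : List (Int × Int)) (x1 : Int) (x2 : Int) (y1 : Int) (y2 : Int), Dom_decide_abs_pos center_positions x1 x2 y1 y2 → Spec_decide_abs_pos center_positions x1 x2 y1 y2 (decide_abs_pos center_positions x1 x2 y1 y2)

-- ===== LEMMAS AND PROOFS =====
-- the label one point gets under A's branch structure
def pvLabelA (x1 x2 y1 y2 : Int) (c : Int × Int) : String :=
  if c.1 < x1 then
    if c.2 < y1 then "bottom_left" else if c.2 ≤ y2 then "left" else "top_left"
  else if c.1 ≤ x2 then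
    if c.2 < y1 then "bottom" else if c.2 ≤ y2 then "center" else "top"
  else
    if c.2 < y1 then "bottom_right" else if c.2 ≤ y2 then "right" else "top_right"

-- the label one point gets under B's compositional construction
def pvLabelB (x1 x2 y1 y2 : Int) (c : Int × Int) : String :=
  let parts : List String :=
    (if c.2 < y1 then ["bottom"] else if y2 < c.2 then ["top"] else []) ++
    (if c.1 < x1 then ["left"] else if x2 < c.1 then ["right"] else [])
  if parts = [] then "center" else String.intercalate "_" parts

theorem pvLabel_eq (x1 x2 y1 y2 : Int) (c : Int × Int) :
    pvLabelA x1 x2 y1 y2 c = pvLabelB x1 x2 y1 y2 c := by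
  unfold pvLabelA pvLabelB
  split_ifs <;> first | rfl | omega

theorem pv_foldA (x1 x2 y1 y2 : Int) (cp : List (Int × Int)) (acc : List String) :
    cp.foldl (fun abs_positions center =>
      let x := center.1
      let y := center.2
      if x < x1 then
        if y < y1 then abs_positions ++ ["bottom_left"]
        else if y ≤ y2 then abs_positions ++ ["left"]
        else abs_positions ++ ["top_left"]
      else if x ≤ x2 then
        if y < y1 then abs_positions ++ ["bottom"]
        else if y ≤ y2 then abs_positions ++ ["center"]
        else abs_positions ++ ["top"]
      else
        if y < y1 then abs_positions ++ ["bottom_right"]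
        else if y ≤ y2 then abs_positions ++ ["right"]
        else abs_positions ++ ["top_right"]) acc
      = acc ++ cp.map (pvLabelA x1 x2 y1 y2) := by
  induction cp generalizing acc with
  | nil => simp
  | cons c t ih =>
    simp only [List.foldl_cons, List.map_cons]
    rw [ih]
    have hstep : (let x := c.1
        let y := c.2
        if x < x1 then
          if y < y1 then acc ++ ["bottom_left"]
          else if y ≤ y2 then acc ++ ["left"]
          else acc ++ ["top_left"]
        else if x ≤ x2 then
          if y < y1 then acc ++ ["bottom"]
          else if y ≤ y2 then acc ++ ["center"]
          else acc ++ ["top"]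
        else
          if y < y1 then acc ++ ["bottom_right"]
          else if y ≤ y2 then acc ++ ["right"]
          else acc ++ ["top_right"]) = acc ++ [pvLabelA x1 x2 y1 y2 c] := by
      simp only [pvLabelA]; split_ifs <;> rfl
    rw [hstep]; simp

theorem pv_foldB (x1 x2 y1 y2 : Int) (cp : List (Int × Int)) (acc : List String) :
    cp.foldl (fun out c =>
      let parts : List String :=
        (if c.2 < y1 then ["bottom"] else if y2 < c.2 then ["top"] else []) ++
        (if c.1 < x1 then ["left"] else if x2 < c.1 then ["right"] else [])
      out ++ [if parts = [] then "center" else String.intercalate "_" parts]) acc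
      = acc ++ cp.map (pvLabelB x1 x2 y1 y2) := by
  induction cp generalizing acc with
  | nil => simp
  | cons c t ih =>
    simp only [List.foldl_cons, List.map_cons]
    rw [ih]
    simp [pvLabelB]

-- ===== VERDICT =====
theorem decide_abs_pos_spec : Claim_equal_decide_abs_pos := by
  intro cp x1 x2 y1 y2 _
  unfold Spec_decide_abs_pos decide_abs_pos decide_abs_pos_alt
  rw [pv_foldA, pv_foldB]
  simp [pvLabel_eq]
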